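-- pv_equiv track=rewrite | github.com/LakMehta0210/2048-Sci-Comp | 2048-Sci-Comp-main/Main.py | combineUp
-- ===== SOURCE A (Python) =====
-- def combineUp(gameboard):
--     for col_ind in range(len(gameboard[0])):
--         column = [gameboard[k][col_ind] for k in range(len(gameboard))]
--         for i in range(len(column)-1):
--             if column[i] == column[i+1] and column[i] != None:
--                 column[i] = column[i] + column[i+1]
--                 column[i+1] = None
--         for index in range(len(column)):
--             gameboard[index][col_ind] = column[index]
--     return gameboard
-- ===== SOURCE B (Python) =====
-- def combineUp(gameboard):
--     # Mutates gameboard in place column by column (same as the original) and returns it.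
--     ncols = len(gameboard[0])
--     for c in range(ncols):
--         col = [row[c] for row in gameboard]
--         n = len(col)
--         new = []
--         i = 0
--         while i < n:
--             v = col[i]
--             j = i + 1
--             while j < n and col[j] == v:
--                 j += 1
--             L = j - i
--             if v is None:
--                 new.extend([None] * L)
--             else:
--                 new.extend([2 * v, None] * (L // 2))
--                 if L % 2:
--                     new.append(v)
--             i = j
--         for row, val in zip(gameboard, new):
--             row[c] = val
--     return gameboard
-- ===== Notes on version B (the rewrite author's own statement) =====
-- stated objective: alternative
-- what changed: Per column, A's adjacent-pair fixup loop (merge column[i] into column[i+1]=None as it walks) is replaced by a single run-splitting scan that decomposes the column into maximal runs of equal tiles and re-emits floor(L/2) copies of [2v, None] plus an odd leftover per run, writing back with zip instead of index assignment.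
import Mathlib
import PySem

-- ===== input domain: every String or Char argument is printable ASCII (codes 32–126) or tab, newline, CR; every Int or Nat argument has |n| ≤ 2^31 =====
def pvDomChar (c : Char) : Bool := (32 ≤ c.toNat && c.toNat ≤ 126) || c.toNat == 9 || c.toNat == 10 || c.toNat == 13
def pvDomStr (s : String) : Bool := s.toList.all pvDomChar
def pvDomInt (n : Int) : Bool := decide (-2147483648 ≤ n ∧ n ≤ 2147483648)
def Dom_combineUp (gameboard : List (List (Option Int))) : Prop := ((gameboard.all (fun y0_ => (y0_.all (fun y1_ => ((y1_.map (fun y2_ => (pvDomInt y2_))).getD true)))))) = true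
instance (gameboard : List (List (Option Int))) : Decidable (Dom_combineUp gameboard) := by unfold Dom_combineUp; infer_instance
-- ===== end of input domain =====

-- B replaces A's adjacent-pair fixup loop by a single run-splitting scan per column
-- (emit ⌊L/2⌋ copies of [2v, None] and an odd leftover per maximal run) and writes the
-- column back with zip; same in-place mutation of the board as A, same return value.

-- ===== PORT A =====
-- Python `column[i] + column[i+1]` (both known non-None when used)
def pyAddO (a b : Option Int) : Option Int :=
  match a, b with
  | some x, some y => some (x + y)
  | _, _ => none

-- one iteration of A's inner `for i in range(len(column)-1)` loop body
def mergeStep (c : List (Option Int)) (i : Nat) : List (Option Int) :=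
  if c.getD i none = c.getD (i+1) none ∧ c.getD i none ≠ none then
    (c.set i (pyAddO (c.getD i none) (c.getD (i+1) none))).set (i+1) none
  else c

-- one iteration of A's outer loop: extract column, pair-merge pass, write back by index
def colStepA (gb : List (List (Option Int))) (c : Nat) : List (List (Option Int)) :=
  let col := (List.range gb.length).map (fun k => (gb.getD k []).getD c none)
  let merged := (List.range (col.length - 1)).foldl mergeStep col
  (List.range merged.length).foldl
    (fun g idx => g.set idx ((g.getD idx []).set c (merged.getD idx none))) gb

def combineUp (gameboard : List (List (Option Int))) : List (List (Option Int)) :=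
  (List.range ((gameboard.headD []).length)).foldl colStepA gameboard

-- ===== PORT B =====
-- B's inner `while j < n and col[j] == v` scan: length of the run of v and the remainder
def splitRun (v : Option Int) : List (Option Int) → Nat × List (Option Int)
  | [] => (0, [])
  | x :: t => if x = v then ((splitRun v t).1 + 1, (splitRun v t).2) else (0, x :: t)

theorem splitRun_snd_le (v : Option Int) : ∀ t : List (Option Int), (splitRun v t).2.length ≤ t.length := by
  intro t
  induction t with
  | nil => simp [splitRun]
  | cons x t ih =>
    by_cases h : x = v
    · simp [splitRun, h]
      omega
    · simp [splitRun, h]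

-- what B emits for one maximal run of value v and length L
def runPattern (v : Option Int) (L : Nat) : List (Option Int) :=
  match v with
  | none => List.replicate L none
  | some x => (List.replicate (L / 2) [some (2 * x), none]).flatten ++
      (if L % 2 = 1 then [some x] else [])

-- B's outer `while i < n` loop: rebuild the column run by run
def rebuild : List (Option Int) → List (Option Int)
  | [] => []
  | v :: t => runPattern v ((splitRun v t).1 + 1) ++ rebuild (splitRun v t).2
termination_by l => l.length
decreasing_by
  have := splitRun_snd_le v t
  simp
  omega

-- one iteration of B's outer column loop: extract column, rebuild, write back with zip
def colStepB (gb : List (List (Option Int))) (c : Nat) : List (List (Option Int)) :=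
  let col := gb.map (fun row => row.getD c none)
  List.zipWith (fun row v => row.set c v) gb (rebuild col)

def combineUp_alt (gameboard : List (List (Option Int))) : List (List (Option Int)) :=
  (List.range ((gameboard.headD []).length)).foldl colStepB gameboard

-- ===== PRECONDITION & SPEC =====
-- Pre_ excludes exactly the inputs where the Python raises IndexError: the empty board
-- (gameboard[0]) and boards where some row is shorter than row 0 (gameboard[k][col_ind]).
def Pre_combineUp (gameboard : List (List (Option Int))) : Prop :=
  gameboard ≠ [] ∧ ∀ row ∈ gameboard, (gameboard.headD []).length ≤ row.length

instance (gameboard : List (List (Option Int))) : Decidable (Pre_combineUp gameboard) := by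
  unfold Pre_combineUp; infer_instance

def pvWitness_combineUp : List (List (Option Int)) :=
  [[some 2, some 2], [some 2, none], [some 2, none]]

def Spec_combineUp (gameboard : List (List (Option Int))) (out : List (List (Option Int))) : Prop := out = combineUp_alt gameboard
instance (gameboard : List (List (Option Int))) (out : List (List (Option Int))) : Decidable (Spec_combineUp gameboard out) := by unfold Spec_combineUp; infer_instance

-- ===== CLAIM (what is proved, stated in full; the proofs are below) =====
def Claim_equal_combineUp : Prop := ∀ (gameboard : List (List (Option Int))), Dom_combineUp gameboard → Pre_combineUp gameboard → Spec_combineUp gameboard (combineUp gameboard)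

-- ===== LEMMAS AND PROOFS =====

-- recursive characterisation of A's pair-merge pass
def mrg : List (Option Int) → List (Option Int)
  | [] => []
  | [a] => [a]
  | a :: b :: t =>
    if a = b ∧ a ≠ none then pyAddO a b :: none :: mrg t
    else a :: mrg (b :: t)

theorem mrg_cons_cons (a b : Option Int) (t : List (Option Int)) :
    mrg (a :: b :: t) = if a = b ∧ a ≠ none then pyAddO a b :: none :: mrg t
      else a :: mrg (b :: t) := by
  rw [mrg]

theorem rebuild_nil : rebuild [] = [] := by
  rw [rebuild]

theorem rebuild_cons (v : Option Int) (t : List (Option Int)) :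
    rebuild (v :: t) = runPattern v ((splitRun v t).1 + 1) ++ rebuild (splitRun v t).2 := by
  rw [rebuild]

theorem foldl_range_shift {α : Type} (f : α → Nat → α) (n : Nat) (a : α) :
    (List.range (n+1)).foldl f a = (List.range n).foldl (fun x i => f x (i+1)) (f a 0) := by
  simp [List.range_succ_eq_map, List.foldl_map]

theorem foldl_cons_lift {α : Type} (F G : List α → Nat → List α) (x : α)
    (hFG : ∀ gs i, F (x :: gs) i = x :: G gs i) :
    ∀ (n : Nat) (gt : List α), (List.range n).foldl F (x :: gt) = x :: (List.range n).foldl G gt := by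
  intro n
  induction n with
  | zero => intro gt; simp
  | succ n ih => intro gt; simp [List.range_succ, List.foldl_append, ih, hFG]

theorem mergeStep_cons (x : Option Int) (gs : List (Option Int)) (i : Nat) :
    mergeStep (x :: gs) (i+1) = x :: mergeStep gs i := by
  simp [mergeStep]
  split_ifs with h
  · rfl
  · rfl

theorem mrg_none_cons (t : List (Option Int)) : mrg (none :: t) = none :: mrg t := by
  cases t with
  | nil => simp [mrg]
  | cons b t => simp [mrg_cons_cons]

theorem loopA_eq_mrg : ∀ col : List (Option Int),
    (List.range (col.length - 1)).foldl mergeStep col = mrg col := by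
  intro col
  match col with
  | [] => simp [mrg]
  | [a] => simp [mrg]
  | a :: b :: t =>
    have hlen : (a :: b :: t).length - 1 = t.length + 1 := by simp
    rw [hlen, foldl_range_shift]
    by_cases h : a = b ∧ a ≠ none
    · have hstep : mergeStep (a :: b :: t) 0 = pyAddO a b :: none :: t := by
        simp only [mergeStep, List.getD_cons_zero, List.getD_cons_succ]
        rw [if_pos h]
        rfl
      rw [hstep,
        foldl_cons_lift (fun x i => mergeStep x (i+1)) mergeStep (pyAddO a b)
          (fun gs i => mergeStep_cons (pyAddO a b) gs i)]
      have hrec := loopA_eq_mrg (none :: t)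
      simp only [List.length_cons, Nat.add_sub_cancel] at hrec
      rw [hrec, mrg_none_cons, mrg_cons_cons, if_pos h]
    · have hstep : mergeStep (a :: b :: t) 0 = a :: b :: t := by
        simp only [mergeStep, List.getD_cons_zero, List.getD_cons_succ]
        rw [if_neg h]
      rw [hstep,
        foldl_cons_lift (fun x i => mergeStep x (i+1)) mergeStep a
          (fun gs i => mergeStep_cons a gs i)]
      have hrec := loopA_eq_mrg (b :: t)
      simp only [List.length_cons, Nat.add_sub_cancel] at hrec
      rw [hrec, mrg_cons_cons, if_neg h]
termination_by col => col.length

theorem mrg_length : ∀ col : List (Option Int), (mrg col).length = col.length := by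
  intro col
  match col with
  | [] => simp [mrg]
  | [a] => simp [mrg]
  | a :: b :: t =>
    rw [mrg_cons_cons]
    by_cases h : a = b ∧ a ≠ none
    · rw [if_pos h]
      simp [mrg_length t]
    · rw [if_neg h]
      simp [mrg_length (b :: t)]
termination_by col => col.length

theorem runPattern_one (v : Option Int) : runPattern v 1 = [v] := by
  cases v <;> simp [runPattern]

theorem runPattern_some_step (x : Int) (m : Nat) :
    runPattern (some x) (m + 2) = some (x + x) :: none :: runPattern (some x) m := by
  have h2 : (m + 2) / 2 = m / 2 + 1 := by omega
  have h3 : (m + 2) % 2 = m % 2 := by omega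
  simp [runPattern, h2, h3, List.replicate_succ, two_mul]

theorem rebuild_run (v : Option Int) (t : List (Option Int)) :
    rebuild t = runPattern v (splitRun v t).1 ++ rebuild (splitRun v t).2 := by
  cases t with
  | nil =>
    cases v <;> simp [splitRun, rebuild_nil, runPattern]
  | cons y t' =>
    by_cases h : y = v
    · subst h
      rw [rebuild_cons]
      simp [splitRun]
    · simp [splitRun, h]
      cases v <;> simp [runPattern]

theorem rebuild_eq_mrg : ∀ col : List (Option Int), rebuild col = mrg col := by
  intro col
  match col with
  | [] => rw [rebuild_nil, mrg]
  | v :: t =>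
    cases t with
    | nil =>
      rw [rebuild_cons]
      simp [splitRun, runPattern_one, rebuild_nil, mrg]
    | cons b t' =>
      by_cases hb : b = v
      · subst hb
        cases b with
        | none =>
          rw [rebuild_cons]
          have hs : splitRun none (none :: t') = ((splitRun none t').1 + 1, (splitRun none t').2) := by
            simp [splitRun]
          rw [hs]
          have hrw : runPattern none ((splitRun none t').1 + 1 + 1) =
              none :: runPattern none ((splitRun none t').1 + 1) := by
            simp [runPattern, List.replicate_succ]
          rw [hrw]
          have hrec := rebuild_eq_mrg (none :: t')
          rw [rebuild_cons] at hrec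
          rw [mrg_none_cons, ← hrec]
          simp
        | some x =>
          rw [rebuild_cons]
          have hs : splitRun (some x) (some x :: t') = ((splitRun (some x) t').1 + 1, (splitRun (some x) t').2) := by
            simp [splitRun]
          rw [hs]
          have h11 : (splitRun (some x) t').1 + 1 + 1 = (splitRun (some x) t').1 + 2 := by omega
          have ht' := rebuild_run (some x) t'
          have hrec := rebuild_eq_mrg t'
          simp only [h11, runPattern_some_step, List.cons_append]
          rw [← ht', hrec, mrg_cons_cons, if_pos ⟨rfl, by simp⟩]
          simp [pyAddO]
      · rw [rebuild_cons]
        have hs : splitRun v (b :: t') = (0, b :: t') := by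
          simp [splitRun, hb]
        rw [hs]
        have hrec := rebuild_eq_mrg (b :: t')
        have hcond : ¬ (v = b ∧ v ≠ none) := by
          intro hc
          exact hb hc.1.symm
        rw [mrg_cons_cons, if_neg hcond, ← hrec]
        simp [runPattern_one]
termination_by col => col.length
decreasing_by all_goals (simp; try omega)

theorem map_range_getD {α β : Type} (f : α → β) (d : α) :
    ∀ l : List α, (List.range l.length).map (fun k => f (l.getD k d)) = l.map f := by
  intro l
  induction l with
  | nil => simp
  | cons x t ih =>
    simp [List.range_succ_eq_map, List.map_map]
    exact ih

def stepW (c : Nat) (col : List (Option Int)) (g : List (List (Option Int))) (i : Nat) :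
    List (List (Option Int)) :=
  g.set i ((g.getD i []).set c (col.getD i none))

theorem write_eq (c : Nat) : ∀ (col : List (Option Int)) (gb : List (List (Option Int))),
    col.length = gb.length →
    (List.range col.length).foldl (stepW c col) gb =
      List.zipWith (fun row v => row.set c v) gb col := by
  intro col
  induction col with
  | nil =>
    intro gb h
    cases gb with
    | nil => simp
    | cons r gt => simp at h
  | cons v ct ih =>
    intro gb h
    cases gb with
    | nil => simp at h
    | cons r gt =>
      simp only [List.length_cons]
      rw [foldl_range_shift]
      have h0 : stepW c (v :: ct) (r :: gt) 0 = (r.set c v) :: gt := by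
        simp [stepW]
      rw [h0,
        foldl_cons_lift (fun g i => stepW c (v :: ct) g (i+1)) (stepW c ct) (r.set c v)
          (fun gs i => by simp [stepW])]
      rw [ih gt (by simpa using h)]
      simp

theorem colStep_eq (gb : List (List (Option Int))) (c : Nat) : colStepA gb c = colStepB gb c := by
  show (let col := (List.range gb.length).map (fun k => (gb.getD k []).getD c none)
        let merged := (List.range (col.length - 1)).foldl mergeStep col
        (List.range merged.length).foldl
          (fun g idx => g.set idx ((g.getD idx []).set c (merged.getD idx none))) gb) =
       (let col := gb.map (fun row => row.getD c none)
        List.zipWith (fun row v => row.set c v) gb (rebuild col))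
  simp only []
  rw [map_range_getD (fun row => row.getD c none) [] gb]
  rw [loopA_eq_mrg, rebuild_eq_mrg]
  have hlen : (mrg (gb.map (fun row => row.getD c none))).length = gb.length := by
    rw [mrg_length]; simp
  exact write_eq c (mrg (gb.map (fun row => row.getD c none))) gb hlen

-- ===== VERDICT (by name: the statement is the Claim_ definition above) =====
theorem combineUp_spec : Claim_equal_combineUp := by
  intro gb _ _
  unfold Spec_combineUp combineUp combineUp_alt
  rw [funext fun gb => funext fun c => colStep_eq gb c]
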